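-- pv_equiv track=rewrite | github.com/Dei1400/Dei1400 | Portafolio _1_DeilynSalazar_2020426180/2 formar_pares.py | formar_pares_aux
-- ===== SOURCE A (Python) =====
-- def formar_pares_aux(num, p):
--      if num == 0 : #este cero no es del número de la entrada
--           return 0
--      elif num == 1: #condiciones de parada
--           return 0
--      elif (num%10)%2 == 0 : #se saca el ultimo número y si el modulo de dos es igual a cero es un número par
--           return num%10 * 10 ** p + formar_pares_aux(num//10, p+1) #se le suma uno a p para la siguiente posición
--                  #se saca el ultimo número se multiplica por diez a la potencia de p
--      else :
--           return formar_pares_aux(num//10, p)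
-- ===== SOURCE B (Python) =====
-- def formar_pares_aux(num, p):
--     # stage 1: extract the digits, least significant first
--     digits = []
--     while num > 0:
--         digits.append(num % 10)
--         num //= 10
--     # stage 2: fold the even digits into a value with a running multiplier
--     result, m = 0, 1
--     for d in digits:
--         if d % 2 == 0:
--             result += d * m
--             m *= 10
--     # stage 3: place the collected value at position p
--     return result * 10 ** p
-- ===== Notes on version B (the rewrite author's own statement) =====
-- stated objective: simpler
-- what changed: Replaces A's position-carrying recursion by three staged passes: extract the digit list, fold the even digits into a value with a running multiplier, then scale once by 10**p.
-- outside the precondition, e.g. on formar_pares_aux(0, -1): A returns 0, B returns 0; on formar_pares_aux(24, -1): A returns 2.4, B returns 2.4000000000000004; on formar_pares_aux(-5, 0): A raises RecursionError, B returns 0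
import Mathlib
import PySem

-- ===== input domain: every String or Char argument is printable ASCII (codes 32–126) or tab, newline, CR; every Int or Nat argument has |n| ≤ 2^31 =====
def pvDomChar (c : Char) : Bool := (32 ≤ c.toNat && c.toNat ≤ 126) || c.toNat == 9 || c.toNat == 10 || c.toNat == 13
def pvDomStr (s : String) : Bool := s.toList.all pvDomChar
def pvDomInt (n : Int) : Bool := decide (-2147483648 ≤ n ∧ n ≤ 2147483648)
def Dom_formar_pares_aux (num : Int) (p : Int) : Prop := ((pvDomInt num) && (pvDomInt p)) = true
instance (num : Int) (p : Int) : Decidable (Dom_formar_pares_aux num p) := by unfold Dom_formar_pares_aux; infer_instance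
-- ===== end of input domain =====

-- B replaces A's position-carrying recursion by three staged passes: extract the digit
-- list, fold the even digits into a value with a running multiplier, scale by 10^p
-- (objective: simpler). Equivalence is claimed on Pre_ (num ≥ 0, p ≥ 0).

-- ===== PORT A =====
-- literal transliteration of A's recursion; num is carried as a Nat (exact for num ≥ 0,
-- where Python's num % 10 = n % 10 and num // 10 = n / 10), 10 ** p as 10 ^ p.toNat (exact for p ≥ 0)
def formarParesAuxA (n : Nat) (p : Int) : Int :=
  if n = 0 then 0
  else if n = 1 then 0
  else if (n % 10) % 2 = 0 then
    (n % 10 : Int) * 10 ^ p.toNat + formarParesAuxA (n / 10) (p + 1)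
  else
    formarParesAuxA (n / 10) p
decreasing_by all_goals exact Nat.div_lt_self (by omega) (by omega)

def formar_pares_aux (num : Int) (p : Int) : Int := formarParesAuxA num.toNat p

-- ===== PORT B =====
-- stage 1 of Source B: the `while num > 0` digit-extraction loop (digits LSB first)
def pvDigitsB (n : Nat) : List Int :=
  if n = 0 then [] else ((n % 10 : Nat) : Int) :: pvDigitsB (n / 10)
decreasing_by exact Nat.div_lt_self (by omega) (by omega)

-- stage 2 of Source B: the `for d in digits` fold over the state (result, m)
def pvCollectB (digits : List Int) : Int × Int :=
  digits.foldl (fun s d => if d % 2 = 0 then (s.1 + d * s.2, s.2 * 10) else s) (0, 1)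

-- stage 3: result * 10 ** p (exact as 10 ^ p.toNat for p ≥ 0)
def formar_pares_aux_alt (num : Int) (p : Int) : Int :=
  (pvCollectB (pvDigitsB num.toNat)).1 * 10 ^ p.toNat

-- ===== PRECONDITION & SPEC =====
-- Pre_ excludes num < 0 (A recurses forever: RecursionError; B returns 0) and p < 0
-- (Python's 10 ** p is then a float, so both programs leave the int type whenever the
-- collected value is nonzero; on the remaining p < 0 inputs A happens to return the
-- int 0, excluded with them for a closed-form condition).
def Pre_formar_pares_aux (num : Int) (p : Int) : Prop := 0 ≤ num ∧ 0 ≤ p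
instance (num : Int) (p : Int) : Decidable (Pre_formar_pares_aux num p) := by
  unfold Pre_formar_pares_aux; infer_instance

def pvWitness_formar_pares_aux : Int × Int := (2468, 0)

def Spec_formar_pares_aux (num : Int) (p : Int) (out : Int) : Prop := out = formar_pares_aux_alt num p
instance (num : Int) (p : Int) (out : Int) : Decidable (Spec_formar_pares_aux num p out) := by
  unfold Spec_formar_pares_aux; infer_instance

-- ===== CLAIM (what is proved, stated in full; the proofs are below) =====
def Claim_equal_formar_pares_aux : Prop := ∀ (num : Int) (p : Int), Dom_formar_pares_aux num p → Pre_formar_pares_aux num p → Spec_formar_pares_aux num p (formar_pares_aux num p)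

-- ===== LEMMAS AND PROOFS =====

-- the fold's accumulator is affine in the starting state (r, m)
theorem pvCollect_shift (l : List Int) : ∀ (r m : Int),
    (l.foldl (fun s d => if d % 2 = 0 then (s.1 + d * s.2, s.2 * 10) else s) (r, m)).1
      = r + m * (l.foldl (fun s d => if d % 2 = 0 then (s.1 + d * s.2, s.2 * 10) else s) (0, 1)).1 := by
  induction l with
  | nil => intro r m; simp
  | cons d t ih =>
    intro r m
    simp only [List.foldl_cons]
    by_cases he : d % 2 = 0
    · simp only [he, ite_true]
      rw [ih (r + d * m) (m * 10), ih (0 + d * 1) (1 * 10)]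
      ring
    · simp only [he, ite_false]
      rw [ih r m]

theorem pvCollect_cons (d : Int) (l : List Int) :
    (pvCollectB (d :: l)).1 =
      if d % 2 = 0 then d + 10 * (pvCollectB l).1 else (pvCollectB l).1 := by
  by_cases he : d % 2 = 0
  · simp only [pvCollectB, List.foldl_cons, he, ite_true]
    rw [pvCollect_shift]
    ring
  · simp only [pvCollectB, List.foldl_cons, he, ite_false]

-- A's recursion computes the even-digit value shifted by 10 ^ p
theorem formarParesAuxA_eq (n : Nat) : ∀ (p : Int), 0 ≤ p →
    formarParesAuxA n p = (pvCollectB (pvDigitsB n)).1 * 10 ^ p.toNat := by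
  induction n using Nat.strong_induction_on with
  | _ n ih =>
    intro p hp
    rw [formarParesAuxA]
    by_cases h0 : n = 0
    · subst h0
      have hd : pvDigitsB 0 = [] := by rw [pvDigitsB]; rfl
      simp [hd, pvCollectB]
    · by_cases h1 : n = 1
      · subst h1
        have hd : pvDigitsB 1 = [(1 : Int)] := by rw [pvDigitsB, pvDigitsB]; norm_num
        have hc : (pvCollectB [(1 : Int)]).1 = 0 := by decide
        rw [if_neg h0, hd, hc]
        norm_num
      · have hlt : n / 10 < n := Nat.div_lt_self (by omega) (by omega)
        rw [if_neg h0, if_neg h1, pvDigitsB, if_neg h0, pvCollect_cons]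
        have hcast : (((n % 10 : Nat) : Int) % 2 = 0) ↔ ((n % 10) % 2 = 0) := by omega
        by_cases he : (n % 10) % 2 = 0
        · rw [if_pos he, if_pos (hcast.mpr he), ih _ hlt (p + 1) (by omega),
            show (p + 1).toNat = p.toNat + 1 by omega]
          push_cast
          ring
        · rw [if_neg he, if_neg (fun h => he (hcast.mp h)), ih _ hlt p hp]

-- ===== VERDICT (by name: the statement is the Claim_ definition above) =====
theorem formar_pares_aux_spec : Claim_equal_formar_pares_aux := by
  intro num p _ hpre
  unfold Spec_formar_pares_aux formar_pares_aux formar_pares_aux_alt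
  exact formarParesAuxA_eq num.toNat p hpre.2
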